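-- pv_equiv track=rewrite | github.com/Luudeus/alev | user_validation/rut_format.py | rut_format
-- ===== SOURCE A (Python) =====
-- def rut_format(rut):
--     # Limpiar el RUT de caracteres no deseados y asegurarse de que 'k' sea mayúscula
--     cleaned_rut = ''.join(filter(lambda x: x.isdigit() or x.lower() == 'k', rut)).upper()
--
--     if cleaned_rut and len(cleaned_rut) > 1:
--         # Extraer la parte numérica y el dígito verificador
--         numeric_part = cleaned_rut[:-1]
--         dv = cleaned_rut[-1]
--
--         # Limitar la longitud de la parte numérica a 9 caracteres
--         numeric_part = numeric_part[:9]
--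
--         # Dar formato a la parte numérica
--         formatted_rut = '.'.join([numeric_part[max(i-3, 0):i] for i in range(len(numeric_part), 0, -3)][::-1])
--
--         # Combinar la parte numérica formateada con el dígito verificador
--         formatted_rut += '-' + dv
--
--         return formatted_rut
--
--     return cleaned_rut
-- ===== SOURCE B (Python) =====
-- def rut_format(rut):
--     # Clean: keep digits and k/K, uppercased per character.
--     cleaned = ''.join(c.upper() for c in rut if c.isdigit() or c in 'kK')
--     if len(cleaned) <= 1:
--         return cleaned
--     digits = cleaned[:-1][:9]
--     # Build the grouped numeric part right-to-left, one char at a time,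
--     # inserting a dot after every three consumed digits, then reverse.
--     rev = []
--     for i, c in enumerate(reversed(digits)):
--         if i and i % 3 == 0:
--             rev.append('.')
--         rev.append(c)
--     return ''.join(reversed(rev)) + '-' + cleaned[-1]
-- ===== Notes on version B (the rewrite author's own statement) =====
-- stated objective: simpler
-- what changed: Replaces A's chunk-slicing over range(len,0,-3) plus list-reverse-and-join with a single right-to-left per-character pass that inserts a dot after every three consumed digits, and cleans with a per-character filter/upper comprehension.
import Mathlib
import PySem

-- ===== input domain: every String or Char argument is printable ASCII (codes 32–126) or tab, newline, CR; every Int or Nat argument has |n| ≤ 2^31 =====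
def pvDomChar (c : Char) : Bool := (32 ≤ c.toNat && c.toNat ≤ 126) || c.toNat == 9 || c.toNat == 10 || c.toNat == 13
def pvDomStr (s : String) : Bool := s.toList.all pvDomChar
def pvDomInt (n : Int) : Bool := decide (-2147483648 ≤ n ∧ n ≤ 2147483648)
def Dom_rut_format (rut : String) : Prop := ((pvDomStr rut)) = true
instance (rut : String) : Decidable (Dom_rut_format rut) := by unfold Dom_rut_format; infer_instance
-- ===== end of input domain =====

-- B formats the numeric part by a single right-to-left per-character pass (a dot after every
-- three consumed digits) instead of A's chunk-slicing over range(len,0,-3); objective: simpler.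

-- ===== PORT A =====
def rut_format (rut : String) : String :=
  let cleaned := PySem.Chars.upper ((rut.toList).filter
    (fun c => PySem.Chars.isdigit c || PySem.Chars.lowerChar c == 'k'))
  if cleaned ≠ [] ∧ cleaned.length > 1 then
    let numeric₀ := PySem.List.slice cleaned none (some (-1))
    let dv := PySem.List.pyGetD cleaned (-1) ' '   -- cleaned_rut[-1]; in range since cleaned ≠ []
    let numeric := PySem.List.slice numeric₀ none (some 9)
    let chunks := (PySem.List.pyRange (numeric.length : Int) 0 (-3)).map
      (fun i => PySem.List.slice numeric (some (max (i - 3) 0)) (some i))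
    let formatted := PySem.Chars.join ['.'] chunks.reverse   -- [::-1] on a list is reverse
    String.ofList (formatted ++ ['-'] ++ [dv])
  else String.ofList cleaned

-- ===== PORT B =====
def rut_format_alt (rut : String) : String :=
  let cleaned := ((rut.toList).filter
    (fun c => PySem.Chars.isdigit c || c == 'k' || c == 'K')).map PySem.Chars.upperChar
  if cleaned.length ≤ 1 then String.ofList cleaned
  else
    let digits := PySem.List.slice (PySem.List.slice cleaned none (some (-1))) none (some 9)
    let rev := (PySem.List.enumerate digits.reverse 0).foldl
      (fun acc (p : Int × Char) =>
        (if p.1 ≠ 0 ∧ PySem.Int.mod p.1 3 = 0 then acc ++ ['.'] else acc) ++ [p.2]) []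
    String.ofList (rev.reverse ++ ['-'] ++ [PySem.List.pyGetD cleaned (-1) ' '])

-- ===== PRECONDITION & SPEC =====
def Spec_rut_format (rut : String) (out : String) : Prop := out = rut_format_alt rut
instance (rut : String) (out : String) : Decidable (Spec_rut_format rut out) := by unfold Spec_rut_format; infer_instance

-- ===== CLAIM (what is proved, stated in full; the proofs are below) =====
def Claim_equal_rut_format : Prop := ∀ (rut : String), Dom_rut_format rut → Spec_rut_format rut (rut_format rut)

-- ===== LEMMAS AND PROOFS =====

theorem charEq_iff_toNat (a b : Char) : a = b ↔ a.toNat = b.toNat := by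
  rw [Char.ext_iff, ← UInt32.toNat_inj]; exact Iff.rfl

-- x.lower() == 'k' tests exactly membership in {'k','K'} (for every Char)
theorem lowerChar_eq_k (c : Char) :
    (PySem.Chars.lowerChar c == 'k') = (c == 'k' || c == 'K') := by
  simp only [PySem.Chars.lowerChar, PySem.Chars.isupper]
  by_cases h : 'A' ≤ c ∧ c ≤ 'Z'
  · rw [if_pos (by simp [h])]
    have h' : 65 ≤ c.toNat ∧ c.toNat ≤ 90 := h
    have hv : (Char.ofNat (c.toNat + 32)).toNat = c.toNat + 32 := by
      have : Nat.isValidChar (c.toNat + 32) := Or.inl (by omega)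
      simp [Char.ofNat, this]
    apply Bool.eq_iff_iff.mpr
    simp only [beq_iff_eq, Bool.or_eq_true, charEq_iff_toNat, hv]
    have hk : ('k').toNat = 107 := by decide
    have hK : ('K').toNat = 75 := by decide
    rw [hk, hK]; omega
  · rw [if_neg (by simpa using h)]
    have h' : ¬ (65 ≤ c.toNat ∧ c.toNat ≤ 90) := h
    apply Bool.eq_iff_iff.mpr
    simp only [beq_iff_eq, Bool.or_eq_true, charEq_iff_toNat]
    have hk : ('k').toNat = 107 := by decide
    have hK : ('K').toNat = 75 := by decide
    rw [hk, hK]; omega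

-- the two cleaning passes agree
theorem cleaned_eq (l : List Char) :
    PySem.Chars.upper (l.filter (fun c => PySem.Chars.isdigit c || PySem.Chars.lowerChar c == 'k'))
    = (l.filter (fun c => PySem.Chars.isdigit c || c == 'k' || c == 'K')).map PySem.Chars.upperChar := by
  have hf : (fun c => PySem.Chars.isdigit c || PySem.Chars.lowerChar c == 'k')
      = (fun c => PySem.Chars.isdigit c || c == 'k' || c == 'K') := by
    funext c; rw [lowerChar_eq_k, Bool.or_assoc]
  rw [hf]; rfl

-- A's chunk-join equals the reverse of B's right-to-left accumulation, for every
-- numeric part of length 1..9 (all that survives cleaned[:-1][:9])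
theorem format_eq (d : List Char) (h1 : d ≠ []) (h9 : d.length ≤ 9) :
    PySem.Chars.join ['.'] (((PySem.List.pyRange (d.length : Int) 0 (-3)).map
        (fun i => PySem.List.slice d (some (max (i - 3) 0)) (some i))).reverse)
    = ((PySem.List.enumerate d.reverse 0).foldl
        (fun acc (p : Int × Char) =>
          (if p.1 ≠ 0 ∧ PySem.Int.mod p.1 3 = 0 then acc ++ ['.'] else acc) ++ [p.2]) []).reverse := by
  match d with
  | [] => exact absurd rfl h1
  | [a] =>
    simp [PySem.Chars.join, PySem.List.pyRange, PySem.List.slice, PySem.List.clampIdx, PySem.List.enumerate, PySem.Int.mod, List.range_succ, List.intercalate]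
  | [a,b] =>
    simp [PySem.Chars.join, PySem.List.pyRange, PySem.List.slice, PySem.List.clampIdx, PySem.List.enumerate, PySem.Int.mod, List.range_succ, List.intercalate]
  | [a,b,c] =>
    simp [PySem.Chars.join, PySem.List.pyRange, PySem.List.slice, PySem.List.clampIdx, PySem.List.enumerate, PySem.Int.mod, List.range_succ, List.intercalate]
  | [a,b,c,e] =>
    simp [PySem.Chars.join, PySem.List.pyRange, PySem.List.slice, PySem.List.clampIdx, PySem.List.enumerate, PySem.Int.mod, List.range_succ, List.intercalate]
  | [a,b,c,e,f] =>
    simp [PySem.Chars.join, PySem.List.pyRange, PySem.List.slice, PySem.List.clampIdx, PySem.List.enumerate, PySem.Int.mod, List.range_succ, List.intercalate]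
  | [a,b,c,e,f,g] =>
    simp [PySem.Chars.join, PySem.List.pyRange, PySem.List.slice, PySem.List.clampIdx, PySem.List.enumerate, PySem.Int.mod, List.range_succ, List.intercalate]
  | [a,b,c,e,f,g,h] =>
    simp [PySem.Chars.join, PySem.List.pyRange, PySem.List.slice, PySem.List.clampIdx, PySem.List.enumerate, PySem.Int.mod, List.range_succ, List.intercalate]
  | [a,b,c,e,f,g,h,i] =>
    simp [PySem.Chars.join, PySem.List.pyRange, PySem.List.slice, PySem.List.clampIdx, PySem.List.enumerate, PySem.Int.mod, List.range_succ, List.intercalate]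
  | [a,b,c,e,f,g,h,i,j] =>
    simp [PySem.Chars.join, PySem.List.pyRange, PySem.List.slice, PySem.List.clampIdx, PySem.List.enumerate, PySem.Int.mod, List.range_succ, List.intercalate]
  | a::b::c::e::f::g::h::i::j::k::rest => simp at h9; omega

-- ===== VERDICT (by name: the statement is the Claim_ definition above) =====
theorem rut_format_spec : Claim_equal_rut_format := by
  intro rut _
  unfold Spec_rut_format rut_format rut_format_alt
  dsimp only
  rw [cleaned_eq]
  set cleaned := ((rut.toList).filter
    (fun c => PySem.Chars.isdigit c || c == 'k' || c == 'K')).map PySem.Chars.upperChar with hc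
  by_cases hlen : cleaned.length ≤ 1
  · rw [if_neg (by omega), if_pos hlen]
  · have hne : cleaned ≠ [] := by
      intro h; rw [h] at hlen; simp at hlen
    rw [if_pos ⟨hne, by omega⟩, if_neg hlen]
    have hd : PySem.List.slice (PySem.List.slice cleaned none (some (-1))) none (some 9)
        = (cleaned.dropLast).take 9 := by
      rw [PySem.List.slice_to_neg_one, PySem.List.slice_to cleaned.dropLast (by norm_num : (0:Int) ≤ 9)]
      rfl
    rw [hd]
    have hlc : cleaned.dropLast.length = cleaned.length - 1 := List.length_dropLast
    have hne' : (cleaned.dropLast).take 9 ≠ [] := by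
      intro h
      have h2 := congrArg List.length h
      rw [List.length_take, hlc] at h2
      simp at h2
      omega
    have h9 : ((cleaned.dropLast).take 9).length ≤ 9 := by
      simpa using List.length_take_le 9 _
    rw [format_eq _ hne' h9]
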